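-- pv_equiv track=rewrite | github.com/quangcito/huffman-tree-implementation | src/huffmantree.py | encode_text_from_dict
-- ===== SOURCE A (Python) =====
-- def encode_text_from_dict(text,dict):
--   encoded_text = ""
--   for c in text:
--       if c in dict:
--         encoded_text += dict.get(c)
--       else:
--         return "Your input string is not applicable with the huffman tree constructed from your encoded string"
--   return encoded_text
-- ===== SOURCE B (Python) =====
-- def encode_text_from_dict(text, dict):
--     if all(c in dict for c in text):
--         return ''.join(dict[c] for c in text)
--     return "Your input string is not applicable with the huffman tree constructed from your encoded string"
-- ===== Notes on version B (the rewrite author's own statement) =====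
-- stated objective: simpler
-- what changed: Replaces the interleaved check-and-append loop with a string accumulator by two passes: a short-circuiting all() membership validation, then a single ''.join over the looked-up codes.
import Mathlib
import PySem

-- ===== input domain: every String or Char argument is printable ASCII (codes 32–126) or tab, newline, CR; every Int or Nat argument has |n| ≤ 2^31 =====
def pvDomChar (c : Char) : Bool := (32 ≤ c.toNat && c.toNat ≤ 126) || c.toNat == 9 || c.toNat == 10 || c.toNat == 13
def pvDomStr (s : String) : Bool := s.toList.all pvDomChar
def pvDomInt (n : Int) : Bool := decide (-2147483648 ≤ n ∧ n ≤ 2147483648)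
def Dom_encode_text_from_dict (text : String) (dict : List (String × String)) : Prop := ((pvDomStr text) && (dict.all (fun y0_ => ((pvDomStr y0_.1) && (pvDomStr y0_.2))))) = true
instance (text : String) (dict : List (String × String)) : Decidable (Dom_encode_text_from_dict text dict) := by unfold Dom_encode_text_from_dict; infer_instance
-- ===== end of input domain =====

-- B replaces A's interleaved check-and-append loop by a separate all() validation pass followed by a single join; simpler, same behaviour.


-- the literal error message
def pvErr : String := "Your input string is not applicable with the huffman tree constructed from your encoded string"

-- 'c in dict' / 'dict.get(c)': the char c is compared as a one-character string against the keys (first match)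
def pvLookPred (c : Char) : String × String → Bool := fun p => p.1 == String.ofList [c]

-- ===== PORT A =====
-- A's loop: accumulator of encoded chars, early return of the error message on a missing key
def encodeGoA (dict : List (String × String)) (acc : List Char) : List Char → String
  | [] => String.ofList acc
  | c :: cs =>
    match dict.find? (pvLookPred c) with
    | some p => encodeGoA dict (acc ++ p.2.toList) cs
    | none => pvErr

def encode_text_from_dict (text : String) (dict : List (String × String)) : String :=
  encodeGoA dict [] text.toList

-- ===== PORT B =====
-- B: validate every char with all(), then join the looked-up codes
def encode_text_from_dict_alt (text : String) (dict : List (String × String)) : String :=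
  if text.toList.all (fun c => dict.any (pvLookPred c)) then
    String.ofList ((text.toList.map (fun c => (((dict.find? (pvLookPred c)).map (fun p => p.2.toList)).getD []))).flatten)
  else pvErr

-- ===== PRECONDITION & SPEC =====
def Spec_encode_text_from_dict (text : String) (dict : List (String × String)) (out : String) : Prop := out = encode_text_from_dict_alt text dict
instance (text : String) (dict : List (String × String)) (out : String) : Decidable (Spec_encode_text_from_dict text dict out) := by unfold Spec_encode_text_from_dict; infer_instance

-- ===== CLAIM (what is proved, stated in full; the proofs are below) =====
def Claim_equal_encode_text_from_dict : Prop := ∀ (text : String) (dict : List (String × String)), Dom_encode_text_from_dict text dict → Spec_encode_text_from_dict text dict (encode_text_from_dict text dict)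

-- ===== LEMMAS AND PROOFS =====

-- invariant of A's loop: it returns acc ++ the joined codes when every char has a key, the error message otherwise
theorem encodeGoA_eq (dict : List (String × String)) :
    ∀ (cs : List Char) (acc : List Char),
      encodeGoA dict acc cs =
        if cs.all (fun c => dict.any (pvLookPred c)) then
          String.ofList (acc ++ (cs.map (fun c => (((dict.find? (pvLookPred c)).map (fun p => p.2.toList)).getD []))).flatten)
        else pvErr := by
  intro cs
  induction cs with
  | nil => intro acc; simp [encodeGoA]
  | cons c cs ih =>
    intro acc
    simp only [encodeGoA]
    cases hf : dict.find? (pvLookPred c) with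
    | none =>
      have : dict.any (pvLookPred c) = false := by
        rw [List.any_eq_false]
        intro x hx
        exact List.find?_eq_none.mp hf x hx
      simp [List.all_cons, this]
    | some p =>
      have : dict.any (pvLookPred c) = true := by
        rw [List.any_eq_true]
        exact ⟨p, List.mem_of_find?_eq_some hf, List.find?_some hf⟩
      simp only []
      rw [ih]
      simp [List.all_cons, this, hf]
      simp only [this, Bool.true_and]

-- ===== VERDICT (by name: the statement is the Claim_ definition above) =====
theorem encode_text_from_dict_spec : Claim_equal_encode_text_from_dict := by
  intro text dict _
  unfold Spec_encode_text_from_dict encode_text_from_dict encode_text_from_dict_alt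
  rw [encodeGoA_eq]
  simp
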